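-- pv_equiv track=rewrite | github.com/Trum-ok/BMSTU-labs | 1-semester/ЛР9/когда классы/pupupup.py | middle_slice
-- ===== SOURCE A (Python) =====
-- def middle_slice(array: list[list[list[int]]]) -> list[list[int]]:
--     """Возвращает срез трехмерного массива по его максимальной размерности."""
--     x_len, y_len, z_len = len(array), len(array[0]), len(array[0][0])
--
--     # определяем максимальное измерение и находим индекс середины
--     max_dimension = max(x_len, y_len, z_len)
--
--     if max_dimension == x_len:
--         middle_index = x_len // 2
--         return array[middle_index]
--     elif max_dimension == y_len:
--         middle_index = y_len // 2
--         return [matrix[middle_index] for matrix in array]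
--     else:
--         middle_index = z_len // 2
--         return [[row[middle_index] for row in matrix] for matrix in array]
-- ===== SOURCE B (Python) =====
-- def middle_slice(array: list[list[list[int]]]) -> list[list[int]]:
--     """Возвращает срез трехмерного массива по его максимальной размерности."""
--     x_len, y_len, z_len = len(array), len(array[0]), len(array[0][0])
--
--     # pick the axis of maximal length (ties: x, then y, then z) and its middle
--     dims = (x_len, y_len, z_len)
--     axis = dims.index(max(dims))
--     middle_index = dims[axis] // 2
--
--     # one unified recursion: descend `axis` levels, then index the middle
--     def slice_axis(sub, k):
--         if k == 0:
--             return sub[middle_index]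
--         return [slice_axis(s, k - 1) for s in sub]
--
--     return slice_axis(array, axis)
-- ===== Notes on version B (the rewrite author's own statement) =====
-- stated objective: alternative
-- what changed: Replaces A's three hand-written branch bodies by axis selection via dims.index(max(dims)) plus one generic recursive slicer slice_axis(sub,k) that descends k levels and indexes the middle, unifying the three slicing shapes.
import Mathlib
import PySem

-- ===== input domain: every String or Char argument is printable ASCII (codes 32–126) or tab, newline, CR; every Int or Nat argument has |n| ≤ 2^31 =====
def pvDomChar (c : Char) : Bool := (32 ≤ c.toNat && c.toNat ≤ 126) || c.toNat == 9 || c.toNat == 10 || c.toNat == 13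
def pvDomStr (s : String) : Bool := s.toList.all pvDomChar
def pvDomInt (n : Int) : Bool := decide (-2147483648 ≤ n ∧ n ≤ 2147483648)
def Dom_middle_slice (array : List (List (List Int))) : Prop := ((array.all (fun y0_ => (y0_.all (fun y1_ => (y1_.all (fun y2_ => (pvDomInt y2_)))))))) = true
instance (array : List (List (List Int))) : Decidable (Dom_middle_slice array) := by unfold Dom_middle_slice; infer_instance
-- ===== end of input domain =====

-- B replaces A's three hand-written slicing branches by axis selection via dims.index(max(dims))
-- plus one generic recursive slicer; same cost (alternative decomposition, no speed claim).

-- ===== PORT A =====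
def middle_slice (array : List (List (List Int))) : List (List Int) :=
  let x : Int := array.length
  let y : Int := ((PySem.List.pyGet? array 0).getD []).length
  let z : Int := ((PySem.List.pyGet? ((PySem.List.pyGet? array 0).getD []) 0).getD []).length
  let maxDim : Int := max x (max y z)
  if maxDim = x then
    (PySem.List.pyGet? array (PySem.Int.floordiv x 2)).getD []
  else if maxDim = y then
    array.map (fun matrix => (PySem.List.pyGet? matrix (PySem.Int.floordiv y 2)).getD [])
  else
    array.map (fun matrix => matrix.map (fun row => (PySem.List.pyGet? row (PySem.Int.floordiv z 2)).getD 0))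

-- ===== PORT B =====
-- Source B's heterogeneous recursion slice_axis(sub, k) is ported by hand, step for step, as a
-- type-indexed family: sliceK<k>_ at each depth k the Python call tree reaches (exact on the
-- admitted domain; the Python `k` argument is reflected in the Lean types).
def sliceK0_inner (sub : List Int) (i : Int) : Int := (PySem.List.pyGet? sub i).getD 0
def sliceK0_mid (sub : List (List Int)) (i : Int) : List Int := (PySem.List.pyGet? sub i).getD []
def sliceK0_top (sub : List (List (List Int))) (i : Int) : List (List Int) := (PySem.List.pyGet? sub i).getD []
def sliceK1_mid (sub : List (List Int)) (i : Int) : List Int := sub.map (fun s => sliceK0_inner s i)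
def sliceK1_top (sub : List (List (List Int))) (i : Int) : List (List Int) := sub.map (fun s => sliceK0_mid s i)
def sliceK2_top (sub : List (List (List Int))) (i : Int) : List (List Int) := sub.map (fun s => sliceK1_mid s i)

def middle_slice_alt (array : List (List (List Int))) : List (List Int) :=
  let x : Int := array.length
  let y : Int := ((PySem.List.pyGet? array 0).getD []).length
  let z : Int := ((PySem.List.pyGet? ((PySem.List.pyGet? array 0).getD []) 0).getD []).length
  let dims : List Int := [x, y, z]
  let axis : Nat := (PySem.List.index? dims ((PySem.List.max? dims (fun v => v)).getD 0)).getD 0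
  let middleIndex : Int := PySem.Int.floordiv ((PySem.List.pyGet? dims (axis : Int)).getD 0) 2
  if axis = 0 then sliceK0_top array middleIndex
  else if axis = 1 then sliceK1_top array middleIndex
  else sliceK2_top array middleIndex

-- ===== PRECONDITION & SPEC =====
-- Pre_ = exactly the inputs on which Python A returns (no IndexError): the array and its first
-- matrix are nonempty, and in the y/z branches the middle index is in range of every matrix / row.
def Pre_middle_slice (array : List (List (List Int))) : Prop :=
  array ≠ [] ∧ array.headD [] ≠ [] ∧
  (let x : Int := array.length
   let y : Int := (array.headD []).length
   let z : Int := ((array.headD []).headD []).length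
   let maxDim : Int := max x (max y z)
   if maxDim = x then True
   else if maxDim = y then ∀ matrix ∈ array, PySem.Int.floordiv y 2 < (matrix.length : Int)
   else ∀ matrix ∈ array, ∀ row ∈ matrix, PySem.Int.floordiv z 2 < (row.length : Int))
instance (array : List (List (List Int))) : Decidable (Pre_middle_slice array) := by
  unfold Pre_middle_slice; infer_instance

def pvWitness_middle_slice : List (List (List Int)) := [[[1, 2], [3, 4]]]

def Spec_middle_slice (array : List (List (List Int))) (out : List (List Int)) : Prop := out = middle_slice_alt array
instance (array : List (List (List Int))) (out : List (List Int)) : Decidable (Spec_middle_slice array out) := by unfold Spec_middle_slice; infer_instance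

-- ===== CLAIM (what is proved, stated in full; the proofs are below) =====
def Claim_equal_middle_slice : Prop := ∀ (array : List (List (List Int))), Dom_middle_slice array → Pre_middle_slice array → Spec_middle_slice array (middle_slice array)

-- ===== LEMMAS AND PROOFS =====

-- max(dims) over the three-element list equals the nested binary max A computes.
lemma pv_max3 (x y z : Int) :
    (PySem.List.max? [x, y, z] (fun v => v)).getD 0 = max x (max y z) := by
  rw [PySem.List.max?_id_cons]
  simp [List.foldl, max_assoc]

-- the maximum of three values is one of them
lemma pv_max3_mem (x y z : Int) (hx : max x (max y z) ≠ x) (hy : max x (max y z) ≠ y) :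
    max x (max y z) = z := by
  rcases max_choice x (max y z) with h | h
  · exact absurd h hx
  · rcases max_choice y z with h' | h'
    · exact absurd (h.trans h') hy
    · exact h.trans h'

-- ===== VERDICT (by name: the statement is the Claim_ definition above) =====
theorem middle_slice_spec : Claim_equal_middle_slice := by
  intro array _ _
  unfold Spec_middle_slice middle_slice middle_slice_alt
  simp only [pv_max3]
  set x : Int := (array.length : Int) with hxd
  set y : Int := (((PySem.List.pyGet? array 0).getD []).length : Int) with hyd
  set z : Int := (((PySem.List.pyGet? ((PySem.List.pyGet? array 0).getD []) 0).getD []).length : Int) with hzd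
  by_cases hx : max x (max y z) = x
  · rw [hx, PySem.List.index?_cons_self]
    simp [sliceK0_top]
  · by_cases hy : max x (max y z) = y
    · rw [hy] at hx ⊢
      rw [PySem.List.index?_cons_of_ne _ (Ne.symm hx), PySem.List.index?_cons_self]
      simp [hx, sliceK1_top, sliceK0_mid]
    · have hz := pv_max3_mem _ _ _ hx hy
      rw [hz] at hx hy ⊢
      rw [PySem.List.index?_cons_of_ne _ (Ne.symm hx), PySem.List.index?_cons_of_ne _ (Ne.symm hy),
        PySem.List.index?_cons_self]
      simp [hx, hy, sliceK2_top, sliceK1_mid, sliceK0_inner]
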